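-- pv_equiv track=rewrite | github.com/ajesujoba/UNIQORN | KGTEXT/GET_ANSWER/get_GST_from_QKG_with_Frozenset_RANK_DOCS_KG2.py | get_rank_docs
-- ===== SOURCE A (Python) =====
-- def get_rank_docs(rank_doc):
--
-- 	ans_1_10=0
-- 	ans_11_20=0
-- 	ans_21_30=0
-- 	ans_31_40=0
-- 	ans_41_50=0
-- 	ans_51_100=0
-- 	ans_101_200=0
-- 	ans_201_300=0
-- 	ans_301_400=0
-- 	ans_401_500=0
--
-- 	ans1=0
-- 	ans2=0
-- 	ans3=0
-- 	ans4=0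
-- 	ans5=0
--
-- 	for tup in rank_doc:
-- 		rank=tup[0]
-- 		aa=tup[1]
-- 		if rank>=1 and rank<=10:
-- 			if aa==1:
-- 				ans_1_10=1
-- 		else:
-- 			if rank>=11 and rank<=20:
-- 				if aa==1:
-- 					ans_11_20=1
-- 			else:
-- 				if rank>=21 and rank<=30:
-- 					if aa==1:
-- 						ans_21_30=1
-- 				else:
-- 					if rank>=31 and rank<=40:
-- 						if aa==1:
-- 							ans_31_40=1
-- 					else:
-- 						if rank>=41 and rank<=50:
-- 							if aa==1:
-- 								ans_41_50=1
-- 						else: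
-- 							if rank>=51 and rank<=100:
-- 								if aa==1:
-- 									ans_51_100=1
-- 							else:
-- 								if rank>=101 and rank<=200:
-- 									if aa==1:
-- 										ans_101_200=1
-- 								else:
-- 									if rank>=201 and rank<=300:
-- 										if aa==1:
-- 											ans_201_300=1
-- 									else:
-- 										if rank>=301 and rank<=400:
-- 											if aa==1:
-- 												ans_301_400=1
-- 										else:
-- 											if rank>=401 and rank<=500:
-- 												if aa==1:
-- 													ans_401_500=1
--
-- 	res=[]
-- 	res.append(ans_1_10)
-- 	res.append(ans_11_20)
-- 	res.append(ans_21_30)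
-- 	res.append(ans_31_40)
-- 	res.append(ans_41_50)
-- 	res.append(ans_51_100)
-- 	res.append(ans_101_200)
-- 	res.append(ans_201_300)
-- 	res.append(ans_301_400)
-- 	res.append(ans_401_500)
--
--
-- 	return res
-- ===== SOURCE B (Python) =====
-- def get_rank_docs(rank_doc):
--     buckets = [(1, 10), (11, 20), (21, 30), (31, 40), (41, 50),
--                (51, 100), (101, 200), (201, 300), (301, 400), (401, 500)]
--     return [1 if any(aa == 1 and lo <= rank <= hi for (rank, aa) in rank_doc) else 0
--             for (lo, hi) in buckets]
-- ===== Notes on version B (the rewrite author's own statement) =====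
-- stated objective: simpler
-- what changed: Inverts the loop structure: instead of one pass over the data threading ten mutable flags through a nested if/else ladder, B iterates over a table of the ten (lo,hi) bucket ranges and answers an existential query (any tuple with aa==1 and rank in that range) per bucket, building the result list directly by comprehension.
import Mathlib
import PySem

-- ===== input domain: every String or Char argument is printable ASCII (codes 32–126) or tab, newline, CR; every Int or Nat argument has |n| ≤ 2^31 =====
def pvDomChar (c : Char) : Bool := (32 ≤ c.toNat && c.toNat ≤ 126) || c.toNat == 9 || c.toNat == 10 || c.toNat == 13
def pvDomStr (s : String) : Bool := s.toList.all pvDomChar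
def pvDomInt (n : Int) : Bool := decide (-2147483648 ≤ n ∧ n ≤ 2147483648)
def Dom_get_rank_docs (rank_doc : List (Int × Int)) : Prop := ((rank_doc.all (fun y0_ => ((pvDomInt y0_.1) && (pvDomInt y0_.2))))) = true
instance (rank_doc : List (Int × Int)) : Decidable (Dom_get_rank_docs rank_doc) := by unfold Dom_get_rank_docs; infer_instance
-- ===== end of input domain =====

-- B replaces A's single pass threading ten mutable flags through a nested ladder by a
-- per-bucket existential query over the input (loop inversion); objective: simpler.

-- ===== PORT A =====
-- A's loop state: the ten flag variables, carried as a 10-tuple, updated by the same if/else ladder.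
def pvStepA (s : Int × Int × Int × Int × Int × Int × Int × Int × Int × Int) (tup : Int × Int) :
    Int × Int × Int × Int × Int × Int × Int × Int × Int × Int :=
  let rank := tup.1
  let aa := tup.2
  let (a1, a2, a3, a4, a5, a6, a7, a8, a9, a10) := s
  if rank ≥ 1 ∧ rank ≤ 10 then
    (if aa == 1 then (1, a2, a3, a4, a5, a6, a7, a8, a9, a10) else s)
  else if rank ≥ 11 ∧ rank ≤ 20 then
    (if aa == 1 then (a1, 1, a3, a4, a5, a6, a7, a8, a9, a10) else s)
  else if rank ≥ 21 ∧ rank ≤ 30 then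
    (if aa == 1 then (a1, a2, 1, a4, a5, a6, a7, a8, a9, a10) else s)
  else if rank ≥ 31 ∧ rank ≤ 40 then
    (if aa == 1 then (a1, a2, a3, 1, a5, a6, a7, a8, a9, a10) else s)
  else if rank ≥ 41 ∧ rank ≤ 50 then
    (if aa == 1 then (a1, a2, a3, a4, 1, a6, a7, a8, a9, a10) else s)
  else if rank ≥ 51 ∧ rank ≤ 100 then
    (if aa == 1 then (a1, a2, a3, a4, a5, 1, a7, a8, a9, a10) else s)
  else if rank ≥ 101 ∧ rank ≤ 200 then
    (if aa == 1 then (a1, a2, a3, a4, a5, a6, 1, a8, a9, a10) else s)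
  else if rank ≥ 201 ∧ rank ≤ 300 then
    (if aa == 1 then (a1, a2, a3, a4, a5, a6, a7, 1, a9, a10) else s)
  else if rank ≥ 301 ∧ rank ≤ 400 then
    (if aa == 1 then (a1, a2, a3, a4, a5, a6, a7, a8, 1, a10) else s)
  else if rank ≥ 401 ∧ rank ≤ 500 then
    (if aa == 1 then (a1, a2, a3, a4, a5, a6, a7, a8, a9, 1) else s)
  else s

def get_rank_docs (rank_doc : List (Int × Int)) : List Int :=
  let s := rank_doc.foldl pvStepA (0, 0, 0, 0, 0, 0, 0, 0, 0, 0)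
  let (a1, a2, a3, a4, a5, a6, a7, a8, a9, a10) := s
  [a1, a2, a3, a4, a5, a6, a7, a8, a9, a10]

-- ===== PORT B =====
def pvBuckets : List (Int × Int) :=
  [(1, 10), (11, 20), (21, 30), (31, 40), (41, 50),
   (51, 100), (101, 200), (201, 300), (301, 400), (401, 500)]

def get_rank_docs_alt (rank_doc : List (Int × Int)) : List Int :=
  pvBuckets.map (fun b =>
    if rank_doc.any (fun t => t.2 == 1 && decide (b.1 ≤ t.1) && decide (t.1 ≤ b.2)) then 1 else 0)

-- ===== PRECONDITION & SPEC =====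
def Spec_get_rank_docs (rank_doc : List (Int × Int)) (out : List Int) : Prop := out = get_rank_docs_alt rank_doc
instance (rank_doc : List (Int × Int)) (out : List Int) : Decidable (Spec_get_rank_docs rank_doc out) := by unfold Spec_get_rank_docs; infer_instance

-- ===== CLAIM (what is proved, stated in full; the proofs are below) =====
def Claim_equal_get_rank_docs : Prop := ∀ (rank_doc : List (Int × Int)), Dom_get_rank_docs rank_doc → Spec_get_rank_docs rank_doc (get_rank_docs rank_doc)

-- ===== LEMMAS AND PROOFS =====

-- Proof-only helper: flatten A's 10-tuple state into the list it finally returns.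
def pvToList (s : Int × Int × Int × Int × Int × Int × Int × Int × Int × Int) : List Int :=
  [s.1, s.2.1, s.2.2.1, s.2.2.2.1, s.2.2.2.2.1, s.2.2.2.2.2.1, s.2.2.2.2.2.2.1,
   s.2.2.2.2.2.2.2.1, s.2.2.2.2.2.2.2.2.1, s.2.2.2.2.2.2.2.2.2]

def pvHit (b : Int × Int) (t : Int × Int) : Bool :=
  t.2 == 1 && decide (b.1 ≤ t.1) && decide (t.1 ≤ b.2)

-- One loop step: A's ladder update equals a per-bucket "hit" update of the flag list.
theorem pvStep_char (s : Int × Int × Int × Int × Int × Int × Int × Int × Int × Int) (t : Int × Int) :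
    pvToList (pvStepA s t) =
      List.zipWith (fun b a => if pvHit b t then (1 : Int) else a) pvBuckets (pvToList s) := by
  obtain ⟨rank, aa⟩ := t
  obtain ⟨a1, a2, a3, a4, a5, a6, a7, a8, a9, a10⟩ := s
  by_cases haa : aa = 1
  · subst haa
    rcases (show rank < 1 ∨ (1 ≤ rank ∧ rank ≤ 10) ∨ (11 ≤ rank ∧ rank ≤ 20) ∨ (21 ≤ rank ∧ rank ≤ 30) ∨ (31 ≤ rank ∧ rank ≤ 40) ∨ (41 ≤ rank ∧ rank ≤ 50) ∨ (51 ≤ rank ∧ rank ≤ 100) ∨ (101 ≤ rank ∧ rank ≤ 200) ∨ (201 ≤ rank ∧ rank ≤ 300) ∨ (301 ≤ rank ∧ rank ≤ 400) ∨ (401 ≤ rank ∧ rank ≤ 500) ∨ 501 ≤ rank from by omega) with h|h|h|h|h|h|h|h|h|h|h|h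
    · simp [pvStepA, pvToList, pvBuckets, pvHit, List.zipWith, (show ¬((1:Int) ≤ rank) from by omega), (show ¬((11:Int) ≤ rank) from by omega), (show ¬((21:Int) ≤ rank) from by omega), (show ¬((31:Int) ≤ rank) from by omega), (show ¬((41:Int) ≤ rank) from by omega), (show ¬((51:Int) ≤ rank) from by omega), (show ¬((101:Int) ≤ rank) from by omega), (show ¬((201:Int) ≤ rank) from by omega), (show ¬((301:Int) ≤ rank) from by omega), (show ¬((401:Int) ≤ rank) from by omega), (show (rank ≤ (10:Int)) from by omega), (show (rank ≤ (20:Int)) from by omega), (show (rank ≤ (30:Int)) from by omega), (show (rank ≤ (40:Int)) from by omega), (show (rank ≤ (50:Int)) from by omega), (show (rank ≤ (100:Int)) from by omega), (show (rank ≤ (200:Int)) from by omega), (show (rank ≤ (300:Int)) from by omega), (show (rank ≤ (400:Int)) from by omega), (show (rank ≤ (500:Int)) from by omega)]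
    · simp [pvStepA, pvToList, pvBuckets, pvHit, List.zipWith, (show (1:Int) ≤ rank from by omega), (show ¬((11:Int) ≤ rank) from by omega), (show ¬((21:Int) ≤ rank) from by omega), (show ¬((31:Int) ≤ rank) from by omega), (show ¬((41:Int) ≤ rank) from by omega), (show ¬((51:Int) ≤ rank) from by omega), (show ¬((101:Int) ≤ rank) from by omega), (show ¬((201:Int) ≤ rank) from by omega), (show ¬((301:Int) ≤ rank) from by omega), (show ¬((401:Int) ≤ rank) from by omega), (show rank ≤ (10:Int) from by omega), (show rank ≤ (20:Int) from by omega), (show rank ≤ (30:Int) from by omega), (show rank ≤ (40:Int) from by omega), (show rank ≤ (50:Int) from by omega), (show rank ≤ (100:Int) from by omega), (show rank ≤ (200:Int) from by omega), (show rank ≤ (300:Int) from by omega), (show rank ≤ (400:Int) from by omega), (show rank ≤ (500:Int) from by omega)]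
    · simp [pvStepA, pvToList, pvBuckets, pvHit, List.zipWith, (show (1:Int) ≤ rank from by omega), (show (11:Int) ≤ rank from by omega), (show ¬((21:Int) ≤ rank) from by omega), (show ¬((31:Int) ≤ rank) from by omega), (show ¬((41:Int) ≤ rank) from by omega), (show ¬((51:Int) ≤ rank) from by omega), (show ¬((101:Int) ≤ rank) from by omega), (show ¬((201:Int) ≤ rank) from by omega), (show ¬((301:Int) ≤ rank) from by omega), (show ¬((401:Int) ≤ rank) from by omega), (show ¬(rank ≤ (10:Int)) from by omega), (show rank ≤ (20:Int) from by omega), (show rank ≤ (30:Int) from by omega), (show rank ≤ (40:Int) from by omega), (show rank ≤ (50:Int) from by omega), (show rank ≤ (100:Int) from by omega), (show rank ≤ (200:Int) from by omega), (show rank ≤ (300:Int) from by omega), (show rank ≤ (400:Int) from by omega), (show rank ≤ (500:Int) from by omega)]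
    · simp [pvStepA, pvToList, pvBuckets, pvHit, List.zipWith, (show (1:Int) ≤ rank from by omega), (show (11:Int) ≤ rank from by omega), (show (21:Int) ≤ rank from by omega), (show ¬((31:Int) ≤ rank) from by omega), (show ¬((41:Int) ≤ rank) from by omega), (show ¬((51:Int) ≤ rank) from by omega), (show ¬((101:Int) ≤ rank) from by omega), (show ¬((201:Int) ≤ rank) from by omega), (show ¬((301:Int) ≤ rank) from by omega), (show ¬((401:Int) ≤ rank) from by omega), (show ¬(rank ≤ (10:Int)) from by omega), (show ¬(rank ≤ (20:Int)) from by omega), (show rank ≤ (30:Int) from by omega), (show rank ≤ (40:Int) from by omega), (show rank ≤ (50:Int) from by omega), (show rank ≤ (100:Int) from by omega), (show rank ≤ (200:Int) from by omega), (show rank ≤ (300:Int) from by omega), (show rank ≤ (400:Int) from by omega), (show rank ≤ (500:Int) from by omega)]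
    · simp [pvStepA, pvToList, pvBuckets, pvHit, List.zipWith, (show (1:Int) ≤ rank from by omega), (show (11:Int) ≤ rank from by omega), (show (21:Int) ≤ rank from by omega), (show (31:Int) ≤ rank from by omega), (show ¬((41:Int) ≤ rank) from by omega), (show ¬((51:Int) ≤ rank) from by omega), (show ¬((101:Int) ≤ rank) from by omega), (show ¬((201:Int) ≤ rank) from by omega), (show ¬((301:Int) ≤ rank) from by omega), (show ¬((401:Int) ≤ rank) from by omega), (show ¬(rank ≤ (10:Int)) from by omega), (show ¬(rank ≤ (20:Int)) from by omega), (show ¬(rank ≤ (30:Int)) from by omega), (show rank ≤ (40:Int) from by omega), (show rank ≤ (50:Int) from by omega), (show rank ≤ (100:Int) from by omega), (show rank ≤ (200:Int) from by omega), (show rank ≤ (300:Int) from by omega), (show rank ≤ (400:Int) from by omega), (show rank ≤ (500:Int) from by omega)]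
    · simp [pvStepA, pvToList, pvBuckets, pvHit, List.zipWith, (show (1:Int) ≤ rank from by omega), (show (11:Int) ≤ rank from by omega), (show (21:Int) ≤ rank from by omega), (show (31:Int) ≤ rank from by omega), (show (41:Int) ≤ rank from by omega), (show ¬((51:Int) ≤ rank) from by omega), (show ¬((101:Int) ≤ rank) from by omega), (show ¬((201:Int) ≤ rank) from by omega), (show ¬((301:Int) ≤ rank) from by omega), (show ¬((401:Int) ≤ rank) from by omega), (show ¬(rank ≤ (10:Int)) from by omega), (show ¬(rank ≤ (20:Int)) from by omega), (show ¬(rank ≤ (30:Int)) from by omega), (show ¬(rank ≤ (40:Int)) from by omega), (show rank ≤ (50:Int) from by omega), (show rank ≤ (100:Int) from by omega), (show rank ≤ (200:Int) from by omega), (show rank ≤ (300:Int) from by omega), (show rank ≤ (400:Int) from by omega), (show rank ≤ (500:Int) from by omega)]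
    · simp [pvStepA, pvToList, pvBuckets, pvHit, List.zipWith, (show (1:Int) ≤ rank from by omega), (show (11:Int) ≤ rank from by omega), (show (21:Int) ≤ rank from by omega), (show (31:Int) ≤ rank from by omega), (show (41:Int) ≤ rank from by omega), (show (51:Int) ≤ rank from by omega), (show ¬((101:Int) ≤ rank) from by omega), (show ¬((201:Int) ≤ rank) from by omega), (show ¬((301:Int) ≤ rank) from by omega), (show ¬((401:Int) ≤ rank) from by omega), (show ¬(rank ≤ (10:Int)) from by omega), (show ¬(rank ≤ (20:Int)) from by omega), (show ¬(rank ≤ (30:Int)) from by omega), (show ¬(rank ≤ (40:Int)) from by omega), (show ¬(rank ≤ (50:Int)) from by omega), (show rank ≤ (100:Int) from by omega), (show rank ≤ (200:Int) from by omega), (show rank ≤ (300:Int) from by omega), (show rank ≤ (400:Int) from by omega), (show rank ≤ (500:Int) from by omega)]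
    · simp [pvStepA, pvToList, pvBuckets, pvHit, List.zipWith, (show (1:Int) ≤ rank from by omega), (show (11:Int) ≤ rank from by omega), (show (21:Int) ≤ rank from by omega), (show (31:Int) ≤ rank from by omega), (show (41:Int) ≤ rank from by omega), (show (51:Int) ≤ rank from by omega), (show (101:Int) ≤ rank from by omega), (show ¬((201:Int) ≤ rank) from by omega), (show ¬((301:Int) ≤ rank) from by omega), (show ¬((401:Int) ≤ rank) from by omega), (show ¬(rank ≤ (10:Int)) from by omega), (show ¬(rank ≤ (20:Int)) from by omega), (show ¬(rank ≤ (30:Int)) from by omega), (show ¬(rank ≤ (40:Int)) from by omega), (show ¬(rank ≤ (50:Int)) from by omega), (show ¬(rank ≤ (100:Int)) from by omega), (show rank ≤ (200:Int) from by omega), (show rank ≤ (300:Int) from by omega), (show rank ≤ (400:Int) from by omega), (show rank ≤ (500:Int) from by omega)]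
    · simp [pvStepA, pvToList, pvBuckets, pvHit, List.zipWith, (show (1:Int) ≤ rank from by omega), (show (11:Int) ≤ rank from by omega), (show (21:Int) ≤ rank from by omega), (show (31:Int) ≤ rank from by omega), (show (41:Int) ≤ rank from by omega), (show (51:Int) ≤ rank from by omega), (show (101:Int) ≤ rank from by omega), (show (201:Int) ≤ rank from by omega), (show ¬((301:Int) ≤ rank) from by omega), (show ¬((401:Int) ≤ rank) from by omega), (show ¬(rank ≤ (10:Int)) from by omega), (show ¬(rank ≤ (20:Int)) from by omega), (show ¬(rank ≤ (30:Int)) from by omega), (show ¬(rank ≤ (40:Int)) from by omega), (show ¬(rank ≤ (50:Int)) from by omega), (show ¬(rank ≤ (100:Int)) from by omega), (show ¬(rank ≤ (200:Int)) from by omega), (show rank ≤ (300:Int) from by omega), (show rank ≤ (400:Int) from by omega), (show rank ≤ (500:Int) from by omega)]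
    · simp [pvStepA, pvToList, pvBuckets, pvHit, List.zipWith, (show (1:Int) ≤ rank from by omega), (show (11:Int) ≤ rank from by omega), (show (21:Int) ≤ rank from by omega), (show (31:Int) ≤ rank from by omega), (show (41:Int) ≤ rank from by omega), (show (51:Int) ≤ rank from by omega), (show (101:Int) ≤ rank from by omega), (show (201:Int) ≤ rank from by omega), (show (301:Int) ≤ rank from by omega), (show ¬((401:Int) ≤ rank) from by omega), (show ¬(rank ≤ (10:Int)) from by omega), (show ¬(rank ≤ (20:Int)) from by omega), (show ¬(rank ≤ (30:Int)) from by omega), (show ¬(rank ≤ (40:Int)) from by omega), (show ¬(rank ≤ (50:Int)) from by omega), (show ¬(rank ≤ (100:Int)) from by omega), (show ¬(rank ≤ (200:Int)) from by omega), (show ¬(rank ≤ (300:Int)) from by omega), (show rank ≤ (400:Int) from by omega), (show rank ≤ (500:Int) from by omega)]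
    · simp [pvStepA, pvToList, pvBuckets, pvHit, List.zipWith, (show (1:Int) ≤ rank from by omega), (show (11:Int) ≤ rank from by omega), (show (21:Int) ≤ rank from by omega), (show (31:Int) ≤ rank from by omega), (show (41:Int) ≤ rank from by omega), (show (51:Int) ≤ rank from by omega), (show (101:Int) ≤ rank from by omega), (show (201:Int) ≤ rank from by omega), (show (301:Int) ≤ rank from by omega), (show (401:Int) ≤ rank from by omega), (show ¬(rank ≤ (10:Int)) from by omega), (show ¬(rank ≤ (20:Int)) from by omega), (show ¬(rank ≤ (30:Int)) from by omega), (show ¬(rank ≤ (40:Int)) from by omega), (show ¬(rank ≤ (50:Int)) from by omega), (show ¬(rank ≤ (100:Int)) from by omega), (show ¬(rank ≤ (200:Int)) from by omega), (show ¬(rank ≤ (300:Int)) from by omega), (show ¬(rank ≤ (400:Int)) from by omega), (show rank ≤ (500:Int) from by omega)]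
    · simp [pvStepA, pvToList, pvBuckets, pvHit, List.zipWith, (show ((1:Int) ≤ rank) from by omega), (show ((11:Int) ≤ rank) from by omega), (show ((21:Int) ≤ rank) from by omega), (show ((31:Int) ≤ rank) from by omega), (show ((41:Int) ≤ rank) from by omega), (show ((51:Int) ≤ rank) from by omega), (show ((101:Int) ≤ rank) from by omega), (show ((201:Int) ≤ rank) from by omega), (show ((301:Int) ≤ rank) from by omega), (show ((401:Int) ≤ rank) from by omega), (show ¬(rank ≤ (10:Int)) from by omega), (show ¬(rank ≤ (20:Int)) from by omega), (show ¬(rank ≤ (30:Int)) from by omega), (show ¬(rank ≤ (40:Int)) from by omega), (show ¬(rank ≤ (50:Int)) from by omega), (show ¬(rank ≤ (100:Int)) from by omega), (show ¬(rank ≤ (200:Int)) from by omega), (show ¬(rank ≤ (300:Int)) from by omega), (show ¬(rank ≤ (400:Int)) from by omega), (show ¬(rank ≤ (500:Int)) from by omega)]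
  · simp [pvStepA, pvToList, pvBuckets, pvHit, haa, List.zipWith]

theorem pvIfOr (p q : Bool) (a : Int) :
    (if q then (1:Int) else if p then 1 else a) = (if (p || q) then 1 else a) := by
  cases p <;> cases q <;> simp

-- The whole fold: each flag is 1 iff some tuple hits its bucket, else the starting flag.
theorem pvFold_char (l : List (Int × Int)) (s : Int × Int × Int × Int × Int × Int × Int × Int × Int × Int) :
    pvToList (l.foldl pvStepA s) =
      List.zipWith (fun b a => if l.any (pvHit b) then (1 : Int) else a) pvBuckets (pvToList s) := by
  induction l generalizing s with
  | nil => simp [pvToList, pvBuckets, List.zipWith]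
  | cons t ts ih =>
    simp only [List.foldl_cons]
    rw [ih (pvStepA s t), pvStep_char s t]
    obtain ⟨a1, a2, a3, a4, a5, a6, a7, a8, a9, a10⟩ := s
    simp only [pvToList, pvBuckets, List.zipWith, List.any_cons]
    simp [pvIfOr]


-- ===== VERDICT (by name: the statement is the Claim_ definition above) =====
theorem get_rank_docs_spec : Claim_equal_get_rank_docs := by
  intro rank_doc _
  unfold Spec_get_rank_docs get_rank_docs get_rank_docs_alt
  simpa [pvToList, pvBuckets, pvHit, List.zipWith] using
    pvFold_char rank_doc (0, 0, 0, 0, 0, 0, 0, 0, 0, 0)
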